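-- pv_equiv track=rewrite | github.com/polaris64/advent-of-code | 2015/06/solve.py | follow_instrs_v1
-- ===== SOURCE A (Python) =====
-- def follow_instrs_v1(instrs):
--     grid = dict()
--     for instr in instrs:
--         minx, miny = instr[1][0]
--         maxx, maxy = instr[1][1]
--
--         new_cells = [(x, y) for x in range(minx, maxx + 1) for y in range(miny, maxy + 1)]
--
--         # Union new_set and grid
--         if instr[0] == "turn on":
--             for cell in new_cells:
--                 grid[cell] = 1
--
--         # Difference new_set and grid
--         elif instr[0] == "turn off":
--             for cell in new_cells:
--                 grid[cell] = 0
--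
--         # Intersect new_set and grid
--         elif instr[0] == "toggle":
--             for cell in new_cells:
--                 grid[cell] = 0 if cell in grid and grid[cell] == 1 else 1
--
--     return grid
-- ===== SOURCE B (Python) =====
-- OPS = ("turn on", "turn off", "toggle")
--
-- def follow_instrs_v1(instrs):
--     # Per-cell evaluation: a cell's final state is just the fold of the
--     # instructions that cover it, so compute each covered cell directly.
--     def value(x, y):
--         v = 0
--         for op, ((x0, y0), (x1, y1)) in instrs:
--             if x0 <= x <= x1 and y0 <= y <= y1:
--                 if op == "turn on":
--                     v = 1
--                 elif op == "turn off":
--                     v = 0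
--                 elif op == "toggle":
--                     v = 1 - v
--         return v
--
--     return {(x, y): value(x, y)
--             for op, ((x0, y0), (x1, y1)) in instrs
--             if op in OPS
--             for x in range(x0, x1 + 1)
--             for y in range(y0, y1 + 1)}
-- ===== Notes on version B (the rewrite author's own statement) =====
-- stated objective: alternative
-- what changed: A mutates a shared grid dict forward through every instruction; B is a single dict comprehension over the covered cells that computes each cell's final state independently by folding the instructions over that one cell.
import Mathlib
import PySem

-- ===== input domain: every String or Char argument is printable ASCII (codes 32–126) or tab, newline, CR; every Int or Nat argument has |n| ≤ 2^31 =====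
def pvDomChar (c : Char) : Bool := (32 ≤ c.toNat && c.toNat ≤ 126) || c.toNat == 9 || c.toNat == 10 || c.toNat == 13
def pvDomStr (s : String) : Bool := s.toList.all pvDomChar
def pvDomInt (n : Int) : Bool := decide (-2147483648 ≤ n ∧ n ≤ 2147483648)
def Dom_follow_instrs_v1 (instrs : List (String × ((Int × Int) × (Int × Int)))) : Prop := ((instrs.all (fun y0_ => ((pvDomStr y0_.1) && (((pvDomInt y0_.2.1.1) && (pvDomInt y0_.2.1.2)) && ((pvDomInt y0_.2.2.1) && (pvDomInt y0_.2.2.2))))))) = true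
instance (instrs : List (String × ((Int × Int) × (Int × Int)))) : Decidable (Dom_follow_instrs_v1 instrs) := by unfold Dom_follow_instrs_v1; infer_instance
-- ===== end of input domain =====

-- B evaluates each covered cell's final state directly from the instruction list
-- (one dict comprehension), instead of A's incremental mutation of a shared grid.

-- ===== PORT A =====
def follow_instrs_v1 (instrs : List (String × ((Int × Int) × (Int × Int)))) : List (Int × Int × Int) :=
  let grid := instrs.foldl (fun grid instr =>
    let minx := instr.2.1.1
    let miny := instr.2.1.2
    let maxx := instr.2.2.1
    let maxy := instr.2.2.2
    let new_cells := (PySem.List.pyRange minx (maxx + 1) 1).flatMap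
      (fun x => (PySem.List.pyRange miny (maxy + 1) 1).map (fun y => (x, y)))
    if instr.1 == "turn on" then
      new_cells.foldl (fun g cell => g.insert cell (1 : Int)) grid
    else if instr.1 == "turn off" then
      new_cells.foldl (fun g cell => g.insert cell (0 : Int)) grid
    else if instr.1 == "toggle" then
      new_cells.foldl (fun g cell =>
        g.insert cell (if g.contains cell && (g.getD cell 0 == 1) then (0 : Int) else 1)) grid
    else grid)
    (PySem.Dict.empty : PySem.Dict (Int × Int) Int)
  grid.items.map (fun p => (p.1.1, p.1.2, p.2))

-- ===== PORT B =====
-- B's `value(x, y)`: fold the instruction list over one cell's state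
def pvVal (x y : Int) (instrs : List (String × ((Int × Int) × (Int × Int)))) : Int :=
  instrs.foldl (fun v i =>
    if i.2.1.1 ≤ x && x ≤ i.2.2.1 && i.2.1.2 ≤ y && y ≤ i.2.2.2 then
      if i.1 == "turn on" then 1
      else if i.1 == "turn off" then 0
      else if i.1 == "toggle" then 1 - v
      else v
    else v) 0

-- B's dict comprehension: the nested `for`/`if` clauses as a fold building the dict
def follow_instrs_v1_alt (instrs : List (String × ((Int × Int) × (Int × Int)))) : List (Int × Int × Int) :=
  let grid := instrs.foldl (fun g i =>
    if i.1 == "turn on" || i.1 == "turn off" || i.1 == "toggle" then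
      ((PySem.List.pyRange i.2.1.1 (i.2.2.1 + 1) 1).flatMap
        (fun x => (PySem.List.pyRange i.2.1.2 (i.2.2.2 + 1) 1).map (fun y => (x, y)))).foldl
        (fun g c => g.insert c (pvVal c.1 c.2 instrs)) g
    else g) (PySem.Dict.empty : PySem.Dict (Int × Int) Int)
  grid.items.map (fun p => (p.1.1, p.1.2, p.2))

-- ===== PRECONDITION & SPEC =====
def Spec_follow_instrs_v1 (instrs : List (String × ((Int × Int) × (Int × Int)))) (out : List (Int × Int × Int)) : Prop := out = follow_instrs_v1_alt instrs
instance (instrs : List (String × ((Int × Int) × (Int × Int)))) (out : List (Int × Int × Int)) : Decidable (Spec_follow_instrs_v1 instrs out) := by unfold Spec_follow_instrs_v1; infer_instance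

-- ===== CLAIM (what is proved, stated in full; the proofs are below) =====
def Claim_equal_follow_instrs_v1 : Prop := ∀ (instrs : List (String × ((Int × Int) × (Int × Int)))), Dom_follow_instrs_v1 instrs → Spec_follow_instrs_v1 instrs (follow_instrs_v1 instrs)

-- ===== LEMMAS AND PROOFS =====

-- A's per-instruction step (the exact lambda of the port)
def pvStepA (grid : PySem.Dict (Int × Int) Int) (instr : String × ((Int × Int) × (Int × Int))) :
    PySem.Dict (Int × Int) Int :=
  let minx := instr.2.1.1
  let miny := instr.2.1.2
  let maxx := instr.2.2.1
  let maxy := instr.2.2.2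
  let new_cells := (PySem.List.pyRange minx (maxx + 1) 1).flatMap
    (fun x => (PySem.List.pyRange miny (maxy + 1) 1).map (fun y => (x, y)))
  if instr.1 == "turn on" then
    new_cells.foldl (fun g cell => g.insert cell (1 : Int)) grid
  else if instr.1 == "turn off" then
    new_cells.foldl (fun g cell => g.insert cell (0 : Int)) grid
  else if instr.1 == "toggle" then
    new_cells.foldl (fun g cell =>
      g.insert cell (if g.contains cell && (g.getD cell 0 == 1) then (0 : Int) else 1)) grid
  else grid

def pvCells (instr : String × ((Int × Int) × (Int × Int))) : List (Int × Int) :=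
  (PySem.List.pyRange instr.2.1.1 (instr.2.2.1 + 1) 1).flatMap
    (fun x => (PySem.List.pyRange instr.2.1.2 (instr.2.2.2 + 1) 1).map (fun y => (x, y)))

def pvKnown (op : String) : Bool := op == "turn on" || op == "turn off" || op == "toggle"

def pvInRect (instr : String × ((Int × Int) × (Int × Int))) (x y : Int) : Bool :=
  instr.2.1.1 ≤ x && x ≤ instr.2.2.1 && instr.2.1.2 ≤ y && y ≤ instr.2.2.2

def pvGridOf (l : List (String × ((Int × Int) × (Int × Int)))) : PySem.Dict (Int × Int) Int :=
  l.foldl pvStepA (PySem.Dict.empty)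

-- B's grid, its value looked up in the full list `full`
def pvStepB (full : List (String × ((Int × Int) × (Int × Int))))
    (g : PySem.Dict (Int × Int) Int) (i : String × ((Int × Int) × (Int × Int))) :
    PySem.Dict (Int × Int) Int :=
  if i.1 == "turn on" || i.1 == "turn off" || i.1 == "toggle" then
    ((PySem.List.pyRange i.2.1.1 (i.2.2.1 + 1) 1).flatMap
      (fun x => (PySem.List.pyRange i.2.1.2 (i.2.2.2 + 1) 1).map (fun y => (x, y)))).foldl
      (fun g c => g.insert c (pvVal c.1 c.2 full)) g
  else g

def pvGridB (full l : List (String × ((Int × Int) × (Int × Int)))) : PySem.Dict (Int × Int) Int :=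
  l.foldl (pvStepB full) (PySem.Dict.empty)

def pvTouched (l : List (String × ((Int × Int) × (Int × Int)))) (x y : Int) : Bool :=
  l.any (fun i => pvKnown i.1 && pvInRect i x y)

def pvKeysOf (l : List (String × ((Int × Int) × (Int × Int)))) : List (Int × Int) :=
  l.foldl (fun s i => if pvKnown i.1 then PySem.Set.update s (pvCells i) else s) []

theorem pv_A_eq (l : List (String × ((Int × Int) × (Int × Int)))) :
    follow_instrs_v1 l = (pvGridOf l).items.map (fun p => (p.1.1, p.1.2, p.2)) := rfl

theorem pv_B_eq (l : List (String × ((Int × Int) × (Int × Int)))) :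
    follow_instrs_v1_alt l = (pvGridB l l).items.map (fun p => (p.1.1, p.1.2, p.2)) := rfl

theorem pv_mem_cells (i : String × ((Int × Int) × (Int × Int))) (c : Int × Int) :
    c ∈ pvCells i ↔ pvInRect i c.1 c.2 = true := by
  obtain ⟨x, y⟩ := c
  simp only [pvCells, List.mem_flatMap, List.mem_map, PySem.List.mem_pyRange_one, pvInRect,
    Prod.mk.injEq, Bool.and_eq_true, decide_eq_true_eq]
  constructor
  · rintro ⟨a, ⟨ha1, ha2⟩, b, ⟨hb1, hb2⟩, h1, h2⟩
    subst h1; subst h2; omega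
  · rintro ⟨⟨⟨h1, h2⟩, h3⟩, h4⟩
    exact ⟨x, ⟨h1, by omega⟩, y, ⟨h3, by omega⟩, rfl, rfl⟩

theorem pv_nodup_cells (i : String × ((Int × Int) × (Int × Int))) : (pvCells i).Nodup := by
  unfold pvCells
  rw [List.nodup_flatMap]
  refine ⟨fun x _ => List.Nodup.map (fun a b h => by simpa using h) (PySem.List.nodup_pyRange_one _ _), ?_⟩
  refine List.Pairwise.imp ?_ (PySem.List.nodup_pyRange_one i.2.1.1 (i.2.2.1 + 1))
  intro a b hab
  simp only [Function.onFun, List.disjoint_left, List.mem_map]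
  rintro c ⟨y, _, rfl⟩ ⟨y', _, h⟩
  exact hab (by simpa using (Prod.mk.injEq ..).mp h.symm |>.1)

-- value of pvVal one instruction further
theorem pv_val_snoc (x y : Int) (l : List (String × ((Int × Int) × (Int × Int))))
    (i : String × ((Int × Int) × (Int × Int))) :
    pvVal x y (l ++ [i]) =
      (if pvInRect i x y then
        if i.1 == "turn on" then 1
        else if i.1 == "turn off" then 0
        else if i.1 == "toggle" then 1 - pvVal x y l
        else pvVal x y l
      else pvVal x y l) := by
  simp [pvVal, List.foldl_append, pvInRect]

theorem pv_val_zero_one (x y : Int) (l : List (String × ((Int × Int) × (Int × Int)))) :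
    pvVal x y l = 0 ∨ pvVal x y l = 1 := by
  induction l using List.reverseRecOn with
  | nil => left; rfl
  | append_singleton l i ih =>
    rw [pv_val_snoc]
    split_ifs <;> omega

theorem pv_val_untouched (x y : Int) (l : List (String × ((Int × Int) × (Int × Int)))) :
    pvTouched l x y = false → pvVal x y l = 0 := by
  induction l using List.reverseRecOn with
  | nil => intro _; rfl
  | append_singleton l i ih =>
    intro h
    rw [pvTouched, List.any_append] at h
    simp only [Bool.or_eq_false_iff] at h
    obtain ⟨h1, h2⟩ := h
    have hl : pvVal x y l = 0 := ih h1
    rw [pv_val_snoc]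
    by_cases hin : pvInRect i x y = true
    · have hkn : pvKnown i.1 = false := by
        simp only [List.any_cons, List.any_nil, Bool.or_false, hin, Bool.and_true] at h2
        exact h2
      have k1 : i.1 ≠ "turn on" := by intro e; rw [pvKnown, e] at hkn; simp at hkn
      have k2 : i.1 ≠ "turn off" := by intro e; rw [pvKnown, e] at hkn; simp at hkn
      have k3 : i.1 ≠ "toggle" := by intro e; rw [pvKnown, e] at hkn; simp at hkn
      simp [hin, k1, k2, k3, hl]
    · rw [Bool.not_eq_true] at hin
      simp [hin, hl]

-- dict lookups after an insert loop whose value depends only on the cell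
theorem pv_getF (f : Int × Int → Int) (cs : List (Int × Int)) :
    ∀ (d : PySem.Dict (Int × Int) Int) (c : Int × Int),
      (cs.foldl (fun g cell => g.insert cell (f cell)) d).get? c
        = if c ∈ cs then some (f c) else d.get? c := by
  induction cs with
  | nil => intro d c; simp
  | cons a cs ih =>
    intro d c
    rw [List.foldl_cons, ih]
    by_cases h1 : c ∈ cs <;> by_cases h2 : c = a <;>
      simp [h1, h2, PySem.Dict.get?_insert]

def pvTog (o : Option Int) : Int := if o == some 1 then 0 else 1

theorem pv_togcond (g : PySem.Dict (Int × Int) Int) (cell : Int × Int) :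
    (if g.contains cell && (g.getD cell 0 == 1) then (0 : Int) else 1) = pvTog (g.get? cell) := by
  rw [PySem.Dict.contains_eq_isSome_get?, PySem.Dict.getD_eq_get?_getD]
  cases ho : g.get? cell with
  | none => simp [pvTog]
  | some v => simp [pvTog]

-- dict lookups after the toggle insert loop (cells pairwise distinct)
theorem pv_getT (cs : List (Int × Int)) :
    cs.Nodup → ∀ (d : PySem.Dict (Int × Int) Int) (c : Int × Int),
      (cs.foldl (fun g cell =>
          g.insert cell (if g.contains cell && (g.getD cell 0 == 1) then (0 : Int) else 1)) d).get? c
        = if c ∈ cs then some (pvTog (d.get? c)) else d.get? c := by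
  induction cs with
  | nil => intro _ d c; simp
  | cons a cs ih =>
    intro hnd d c
    rcases List.nodup_cons.mp hnd with ⟨ha, hnd'⟩
    rw [List.foldl_cons, ih hnd', pv_togcond]
    by_cases h2 : c = a
    · subst h2
      simp [ha]
    · by_cases h1 : c ∈ cs <;>
        simp [h1, h2, PySem.Dict.get?_insert_of_ne _ _ h2]

theorem pv_nodup_keysA (l : List (String × ((Int × Int) × (Int × Int)))) :
    ∀ d : PySem.Dict (Int × Int) Int, d.keys.Nodup → ((l.foldl pvStepA d).keys).Nodup := by
  induction l with
  | nil => intro d h; exact h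
  | cons i l ih =>
    intro d h
    rw [List.foldl_cons]
    apply ih
    unfold pvStepA
    split_ifs
    · exact PySem.Dict.nodup_keys_foldl_insert _ _ _ h
    · exact PySem.Dict.nodup_keys_foldl_insert _ _ _ h
    · exact PySem.Dict.nodup_keys_foldl_insert _ _ _ h
    · exact h

theorem pv_nodup_keysB (full : List (String × ((Int × Int) × (Int × Int))))
    (l : List (String × ((Int × Int) × (Int × Int)))) :
    ∀ d : PySem.Dict (Int × Int) Int, d.keys.Nodup → ((l.foldl (pvStepB full) d).keys).Nodup := by
  induction l with
  | nil => intro d h; exact h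
  | cons i l ih =>
    intro d h
    rw [List.foldl_cons]
    apply ih
    unfold pvStepB
    split_ifs
    · exact PySem.Dict.nodup_keys_foldl_insert _ _ _ h
    · exact h

-- main invariant, A side: keys in first-touch order, value = B's per-cell fold
theorem pv_mainA (l : List (String × ((Int × Int) × (Int × Int)))) :
    (pvGridOf l).keys = pvKeysOf l ∧
      ∀ x y : Int, (pvGridOf l).get? (x, y)
        = if pvTouched l x y then some (pvVal x y l) else none := by
  induction l using List.reverseRecOn with
  | nil =>
    constructor
    · rfl
    · intro x y; simp [pvGridOf, pvTouched]
  | append_singleton l i ih =>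
    obtain ⟨ihk, ihg⟩ := ih
    have hgrid : pvGridOf (l ++ [i]) = pvStepA (pvGridOf l) i := by
      simp [pvGridOf, List.foldl_append]
    have hkeys : pvKeysOf (l ++ [i])
        = if pvKnown i.1 then PySem.Set.update (pvKeysOf l) (pvCells i) else pvKeysOf l := by
      simp [pvKeysOf, List.foldl_append]
    have htch : ∀ x y : Int, pvTouched (l ++ [i]) x y
        = (pvTouched l x y || (pvKnown i.1 && pvInRect i x y)) := by
      intro x y; simp [pvTouched]
    by_cases hon : i.1 = "turn on"
    · have hstep : pvStepA (pvGridOf l) i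
          = (pvCells i).foldl (fun g cell => g.insert cell ((fun _ => (1 : Int)) cell)) (pvGridOf l) := by
        simp [pvStepA, pvCells, hon]
      constructor
      · rw [hgrid, hstep, PySem.Dict.keys_foldl_insert, ihk, hkeys]
        simp [pvKnown, hon]
      · intro x y
        rw [htch, hgrid, hstep, pv_getF, pv_val_snoc]
        by_cases hin : pvInRect i x y = true
        · have hmem : (x, y) ∈ pvCells i := (pv_mem_cells i (x, y)).mpr hin
          simp [hmem, hin, hon, pvKnown]
        · have hmem : (x, y) ∉ pvCells i := fun hm => hin ((pv_mem_cells i (x, y)).mp hm)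
          rw [Bool.not_eq_true] at hin
          simp [hmem, hin, ihg x y]
    · by_cases hoff : i.1 = "turn off"
      · have hstep : pvStepA (pvGridOf l) i
            = (pvCells i).foldl (fun g cell => g.insert cell ((fun _ => (0 : Int)) cell)) (pvGridOf l) := by
          simp [pvStepA, pvCells, hoff]
        constructor
        · rw [hgrid, hstep, PySem.Dict.keys_foldl_insert, ihk, hkeys]
          simp [pvKnown, hoff]
        · intro x y
          rw [htch, hgrid, hstep, pv_getF, pv_val_snoc]
          by_cases hin : pvInRect i x y = true
          · have hmem : (x, y) ∈ pvCells i := (pv_mem_cells i (x, y)).mpr hin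
            simp [hmem, hin, hoff, pvKnown]
          · have hmem : (x, y) ∉ pvCells i := fun hm => hin ((pv_mem_cells i (x, y)).mp hm)
            rw [Bool.not_eq_true] at hin
            simp [hmem, hin, ihg x y]
      · by_cases htog : i.1 = "toggle"
        · have hstep : pvStepA (pvGridOf l) i
              = (pvCells i).foldl (fun g cell =>
                  g.insert cell (if g.contains cell && (g.getD cell 0 == 1) then (0 : Int) else 1))
                (pvGridOf l) := by
            simp [pvStepA, pvCells, htog]
          constructor
          · rw [hgrid, hstep, PySem.Dict.keys_foldl_insert, ihk, hkeys]
            simp [pvKnown, htog]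
          · intro x y
            rw [htch, hgrid, hstep, pv_getT _ (pv_nodup_cells i), pv_val_snoc]
            by_cases hin : pvInRect i x y = true
            · have hmem : (x, y) ∈ pvCells i := (pv_mem_cells i (x, y)).mpr hin
              by_cases htl : pvTouched l x y = true
              · have hv := ihg x y
                rw [htl, if_pos rfl] at hv
                rcases pv_val_zero_one x y l with h0 | h0 <;>
                  simp [hmem, hin, htog, pvKnown, hv, pvTog, h0]
              · rw [Bool.not_eq_true] at htl
                have hv := ihg x y
                rw [htl] at hv
                simp only [Bool.false_eq_true, if_false] at hv
                simp [hmem, hin, htog, pvKnown, hv, pvTog, htl, pv_val_untouched x y l htl]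
            · have hmem : (x, y) ∉ pvCells i := fun hm => hin ((pv_mem_cells i (x, y)).mp hm)
              rw [Bool.not_eq_true] at hin
              simp [hmem, hin, ihg x y]
        · have hknown : pvKnown i.1 = false := by simp [pvKnown, hon, hoff, htog]
          have hstep : pvStepA (pvGridOf l) i = pvGridOf l := by
            simp [pvStepA, hon, hoff, htog]
          constructor
          · rw [hgrid, hstep, ihk, hkeys, hknown]
            simp
          · intro x y
            rw [htch, hgrid, hstep, hknown, pv_val_snoc]
            have t1 : (i.1 == "toggle") = false := by simp [htog]
            have t2 : (i.1 == "turn on") = false := by simp [hon]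
            have t3 : (i.1 == "turn off") = false := by simp [hoff]
            simp [t1, t2, t3, ihg x y]

-- main invariant, B side: same keys, value = pvVal over the full list
theorem pv_mainB (full : List (String × ((Int × Int) × (Int × Int)))) (l : List (String × ((Int × Int) × (Int × Int)))) :
    (pvGridB full l).keys = pvKeysOf l ∧
      ∀ x y : Int, (pvGridB full l).get? (x, y)
        = if pvTouched l x y then some (pvVal x y full) else none := by
  induction l using List.reverseRecOn with
  | nil =>
    constructor
    · rfl
    · intro x y; simp [pvGridB, pvTouched]
  | append_singleton l i ih =>
    obtain ⟨ihk, ihg⟩ := ih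
    have hgrid : pvGridB full (l ++ [i]) = pvStepB full (pvGridB full l) i := by
      simp [pvGridB, List.foldl_append]
    have hkeys : pvKeysOf (l ++ [i])
        = if pvKnown i.1 then PySem.Set.update (pvKeysOf l) (pvCells i) else pvKeysOf l := by
      simp [pvKeysOf, List.foldl_append]
    have htch : ∀ x y : Int, pvTouched (l ++ [i]) x y
        = (pvTouched l x y || (pvKnown i.1 && pvInRect i x y)) := by
      intro x y; simp [pvTouched]
    by_cases hk : pvKnown i.1 = true
    · have hstep : pvStepB full (pvGridB full l) i
          = (pvCells i).foldl (fun g c => g.insert c ((fun c : Int × Int => pvVal c.1 c.2 full) c)) (pvGridB full l) := by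
        simp only [pvStepB, pvCells]
        rw [if_pos (by simpa [pvKnown] using hk)]
      constructor
      · rw [hgrid, hstep, PySem.Dict.keys_foldl_insert, ihk, hkeys, if_pos hk]
      · intro x y
        rw [htch, hgrid, hstep, pv_getF]
        by_cases hin : pvInRect i x y = true
        · have hmem : (x, y) ∈ pvCells i := (pv_mem_cells i (x, y)).mpr hin
          simp [hmem, hin, hk]
        · have hmem : (x, y) ∉ pvCells i := fun hm => hin ((pv_mem_cells i (x, y)).mp hm)
          rw [Bool.not_eq_true] at hin
          simp [hmem, hin, ihg x y]
    · have hstep : pvStepB full (pvGridB full l) i = pvGridB full l := by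
        simp only [pvStepB]
        rw [if_neg (by simpa [pvKnown] using hk)]
      rw [Bool.not_eq_true] at hk
      constructor
      · rw [hgrid, hstep, ihk, hkeys, hk]
        simp
      · intro x y
        rw [htch, hgrid, hstep, hk]
        simp [ihg x y]

-- ===== VERDICT (by name: the statement is the Claim_ definition above) =====
theorem follow_instrs_v1_spec : Claim_equal_follow_instrs_v1 := by
  intro instrs _
  unfold Spec_follow_instrs_v1
  obtain ⟨hkA, hgA⟩ := pv_mainA instrs
  obtain ⟨hkB, hgB⟩ := pv_mainB instrs instrs
  rw [pv_A_eq, pv_B_eq]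
  have hndA : (pvGridOf instrs).keys.Nodup := pv_nodup_keysA instrs _ (by simp)
  have hndB : (pvGridB instrs instrs).keys.Nodup := pv_nodup_keysB instrs instrs _ (by simp)
  rw [PySem.Dict.items_eq_map_keys _ hndA 0, PySem.Dict.items_eq_map_keys _ hndB 0, hkA, hkB,
    List.map_map, List.map_map]
  apply List.map_congr_left
  intro k hkmem
  have hA := hgA k.1 k.2
  have hB := hgB k.1 k.2
  rw [Prod.mk.eta] at hA hB
  by_cases ht : pvTouched instrs k.1 k.2 = true
  · rw [ht, if_pos rfl] at hA hB
    simp [PySem.Dict.getD_eq_get?_getD, hA, hB]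
  · rw [Bool.not_eq_true] at ht
    rw [ht] at hA
    simp only [Bool.false_eq_true, if_false] at hA
    have : k ∈ (pvGridOf instrs).keys := by rw [hkA]; exact hkmem
    exact absurd this ((PySem.Dict.get?_eq_none_iff_not_mem_keys _ _).mp hA)
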